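-- pv_equiv track=rewrite | github.com/orzhan/rusimscore | tools.py | remove_text_in_brackets
-- ===== SOURCE A (Python) =====
-- def remove_text_in_brackets(test_str):
--     ret = ''
--     skip2c = 0
--     for i in test_str:
--         if i == '(':
--             skip2c += 1
--         elif i == ')'and skip2c > 0:
--             skip2c -= 1
--         elif skip2c == 0:
--             ret += i
--     return ret
-- ===== SOURCE B (Python) =====
-- def remove_text_in_brackets(test_str):
--     # pass 1: depth before each character (clamped at 0 on unmatched ')')
--     depths = []
--     d = 0
--     for c in test_str:
--         depths.append(d)
--         if c == '(':
--             d += 1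
--         elif c == ')' and d > 0:
--             d -= 1
--     # pass 2: keep characters at depth 0 that are not '('
--     return ''.join(c for d0, c in zip(depths, test_str) if d0 == 0 and c != '(')
-- ===== Notes on version B (the rewrite author's own statement) =====
-- stated objective: alternative
-- what changed: A interleaves depth tracking and output accumulation in one loop; B first builds a pre-character depth table in one pass, then produces the output with a separate filtering join over the zipped depth/char pairs.
import Mathlib
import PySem

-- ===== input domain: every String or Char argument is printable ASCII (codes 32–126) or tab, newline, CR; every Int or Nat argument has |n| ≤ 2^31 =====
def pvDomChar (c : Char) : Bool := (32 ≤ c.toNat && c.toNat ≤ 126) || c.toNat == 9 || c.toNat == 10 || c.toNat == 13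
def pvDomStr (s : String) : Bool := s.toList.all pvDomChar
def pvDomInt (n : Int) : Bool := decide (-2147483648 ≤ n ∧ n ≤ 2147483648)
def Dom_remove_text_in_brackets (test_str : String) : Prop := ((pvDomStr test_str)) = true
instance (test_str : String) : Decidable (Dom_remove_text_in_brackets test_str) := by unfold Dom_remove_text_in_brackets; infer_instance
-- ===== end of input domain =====

-- B replaces A's interleaved accumulate-and-emit loop by a depth-table pass followed by a
-- separate filtering pass (alternative decomposition, same cost).

-- ===== PORT A =====
def remove_text_in_brackets (test_str : String) : String :=
  let st := test_str.toList.foldl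
    (fun (st : List Char × Int) i =>
      if i = '(' then (st.1, st.2 + 1)
      else if i = ')' ∧ st.2 > 0 then (st.1, st.2 - 1)
      else if st.2 = 0 then (st.1 ++ [i], st.2)
      else st)
    ([], 0)
  String.mk st.1

-- ===== PORT B =====
def remove_text_in_brackets_alt (test_str : String) : String :=
  let st := test_str.toList.foldl
    (fun (st : List Int × Int) c =>
      (st.1 ++ [st.2],
       if c = '(' then st.2 + 1
       else if c = ')' ∧ st.2 > 0 then st.2 - 1
       else st.2))
    ([], 0)
  String.mk (((st.1.zip test_str.toList).filter
      (fun p => p.1 = 0 ∧ p.2 ≠ '(')).map Prod.snd)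

-- ===== PRECONDITION & SPEC =====
def Spec_remove_text_in_brackets (test_str : String) (out : String) : Prop := out = remove_text_in_brackets_alt test_str
instance (test_str : String) (out : String) : Decidable (Spec_remove_text_in_brackets test_str out) := by unfold Spec_remove_text_in_brackets; infer_instance

-- ===== CLAIM (what is proved, stated in full; the proofs are below) =====
def Claim_equal_remove_text_in_brackets : Prop := ∀ (test_str : String), Dom_remove_text_in_brackets test_str → Spec_remove_text_in_brackets test_str (remove_text_in_brackets test_str)

-- ===== LEMMAS AND PROOFS =====

-- emitted characters of A's loop, starting at nesting level s
def pvEmit : Int → List Char → List Char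
  | _, [] => []
  | s, c :: cs =>
    if c = '(' then pvEmit (s + 1) cs
    else if c = ')' ∧ s > 0 then pvEmit (s - 1) cs
    else if s = 0 then c :: pvEmit s cs
    else pvEmit s cs

-- B's depth table, starting at nesting level s
def pvDepths : Int → List Char → List Int
  | _, [] => []
  | s, c :: cs =>
    s :: pvDepths (if c = '(' then s + 1 else if c = ')' ∧ s > 0 then s - 1 else s) cs

theorem foldA_eq (cs : List Char) : ∀ (acc : List Char) (s : Int),
    (cs.foldl
      (fun (st : List Char × Int) i =>
        if i = '(' then (st.1, st.2 + 1)
        else if i = ')' ∧ st.2 > 0 then (st.1, st.2 - 1)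
        else if st.2 = 0 then (st.1 ++ [i], st.2)
        else st)
      (acc, s)).1 = acc ++ pvEmit s cs := by
  induction cs with
  | nil => intro acc s; simp [pvEmit]
  | cons c cs ih =>
    intro acc s
    simp only [List.foldl, pvEmit]
    split_ifs with h1 h2 h3 <;> simp [ih]

theorem foldB_eq (cs : List Char) : ∀ (acc : List Int) (s : Int),
    (cs.foldl
      (fun (st : List Int × Int) c =>
        (st.1 ++ [st.2],
         if c = '(' then st.2 + 1
         else if c = ')' ∧ st.2 > 0 then st.2 - 1
         else st.2))
      (acc, s)).1 = acc ++ pvDepths s cs := by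
  induction cs with
  | nil => intro acc s; simp [pvDepths]
  | cons c cs ih =>
    intro acc s
    simp only [List.foldl, pvDepths]
    rw [ih]
    simp

theorem filter_depths_eq (cs : List Char) : ∀ (s : Int), 0 ≤ s →
    (((pvDepths s cs).zip cs).filter (fun p => p.1 = 0 ∧ p.2 ≠ '(')).map Prod.snd
      = pvEmit s cs := by
  induction cs with
  | nil => intro s _; simp [pvDepths, pvEmit]
  | cons c cs ih =>
    intro s hs
    simp only [pvDepths, pvEmit, List.zip_cons_cons, List.filter]
    split_ifs with h1 h2 h3
    · -- c = '('
      simpa [h1] using ih (s + 1) (by omega)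
    · -- c = ')' ∧ s > 0
      have hns : ¬ (s = 0) := by omega
      simpa [hns, h2.1] using ih (s - 1) (by omega)
    · -- kept: s = 0, c ≠ '('
      simpa [h3, h1] using ih s hs
    · -- s > 0, ordinary char
      simpa [h3, h1] using ih s hs

-- ===== VERDICT (by name: the statement is the Claim_ definition above) =====
theorem remove_text_in_brackets_spec : Claim_equal_remove_text_in_brackets := by
  intro test_str _
  simp only [Spec_remove_text_in_brackets, remove_text_in_brackets, remove_text_in_brackets_alt]
  rw [foldA_eq, foldB_eq]
  rw [List.nil_append, List.nil_append, filter_depths_eq test_str.toList 0 le_rfl]
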